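-- pv_equiv track=rewrite | github.com/adriandalion/CMSC-162-Project-1 | CMSC162_Guide3_Dalion_Mazo.py | compute_grayscale_rows_and_hist
-- ===== SOURCE A (Python) =====
-- from typing import List, Tuple, Optional
--
-- def compute_grayscale_rows_and_hist(rgb_rows: List[List[Tuple[int,int,int]]]):
--     """Compute grayscale rows and histogram using average (R+G+B)/3)."""
--     gray_rows = []
--     ghist = [0]*256
--     for row in rgb_rows:
--         prow = []
--         for (r,g,b) in row:
--             s = int((r + g + b) / 3)
--             prow.append((s,s,s))
--             ghist[s] += 1
--         gray_rows.append(prow)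
--     return gray_rows, ghist
-- ===== SOURCE B (Python) =====
-- from typing import List, Tuple
--
-- def compute_grayscale_rows_and_hist(rgb_rows: List[List[Tuple[int, int, int]]]):
--     """Gray rows by a mapping pass; histogram with inverted loops: one counting
--     scan of the flat gray values per bin, no incremental accumulator at all."""
--     gray_rows = [[(s, s, s) for s in (int((r + g + b) / 3) for (r, g, b) in row)]
--                  for row in rgb_rows]
--     flat = [p[0] for row in gray_rows for p in row]
--     ghist = [flat.count(i) for i in range(256)]
--     return gray_rows, ghist
-- ===== Notes on version B (the rewrite author's own statement) =====
-- stated objective: alternative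
-- what changed: Inverts the loop nesting for the histogram: A makes one fused pass over the pixels incrementing a preallocated 256-slot list in place, B first maps out the gray rows and then builds each histogram bin by an independent counting scan (flat.count(i) per bin), with no mutable accumulator anywhere.
-- intended difference: On inputs containing a pixel whose truncated average gray level is negative (r+g+b <= -3), A silently wraps the negative index and increments the TOP of the histogram (ghist[256+s]), while B counts only gray levels 0..255 and leaves such values uncounted; B's histogram is the intended one, since a negative gray level is not bucket 256+s. — e.g. on compute_grayscale_rows_and_hist([[(-3, 0, 0)]]): A returns ([[((-1), (-1), (-1))]], [0, 0, 0, 0, 0, 0, 0, 0, 0, 0, 0, 0, 0, 0, 0, 0, 0, 0, 0, 0, 0, 0, 0, 0, 0, 0, 0, 0, 0, 0, 0, …, B returns ([[((-1), (-1), (-1))]], [0, 0, 0, 0, 0, 0, 0, 0, 0, 0, 0, 0, 0, 0, 0, 0, 0, 0, 0, 0, 0, 0, 0, 0, 0, 0, 0, 0, 0, 0, 0, …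
import Mathlib
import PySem

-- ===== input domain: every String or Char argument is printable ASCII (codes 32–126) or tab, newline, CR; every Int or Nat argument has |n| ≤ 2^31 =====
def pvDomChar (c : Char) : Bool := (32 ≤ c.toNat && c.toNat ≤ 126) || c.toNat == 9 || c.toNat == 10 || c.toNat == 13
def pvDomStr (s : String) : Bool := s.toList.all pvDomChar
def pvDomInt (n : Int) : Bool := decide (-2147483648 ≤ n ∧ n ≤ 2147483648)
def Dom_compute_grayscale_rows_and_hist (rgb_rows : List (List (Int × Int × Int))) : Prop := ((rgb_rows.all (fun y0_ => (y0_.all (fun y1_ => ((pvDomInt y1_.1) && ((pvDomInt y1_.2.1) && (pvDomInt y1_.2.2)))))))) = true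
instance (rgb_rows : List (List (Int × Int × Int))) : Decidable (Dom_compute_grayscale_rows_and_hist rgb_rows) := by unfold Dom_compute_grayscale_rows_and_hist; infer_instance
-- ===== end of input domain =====

-- B inverts the histogram loop nesting: a mapping pass builds the gray rows, then each of the 256
-- bins is an independent counting scan of the flat gray values — no in-place accumulator,
-- unlike A's single fused pass that bumps a preallocated 256-slot list per pixel.

-- ===== PORT A =====
-- s = int((r+g+b)/3): float division then int() truncates toward zero; on Dom (|components| ≤ 2^31)
-- this is exactly PySem.Int.truncdiv (|r+g+b| < 2^53).
-- 'ghist[s] += 1' is read-then-write with Python index semantics (negative wrap, IndexError out of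
-- range): ported as pyGetD/pySetD, exact whenever the index is in range (guaranteed by Pre_ below).
def compute_grayscale_rows_and_hist (rgb_rows : List (List (Int × Int × Int))) : (List (List (Int × Int × Int))) × List Int :=
  let st := rgb_rows.foldl (fun st row =>
      let inner := row.foldl (fun (pr : List (Int × Int × Int) × List Int) p =>
          let s := PySem.Int.truncdiv (p.1 + p.2.1 + p.2.2) 3
          (pr.1 ++ [(s, s, s)], PySem.List.pySetD pr.2 s (PySem.List.pyGetD pr.2 s 0 + 1)))
        (([] : List (Int × Int × Int)), st.2)
      (st.1 ++ [inner.1], inner.2))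
    (([] : List (List (Int × Int × Int))), List.replicate 256 (0 : Int))
  (st.1, st.2)

-- ===== PORT B =====
def compute_grayscale_rows_and_hist_alt (rgb_rows : List (List (Int × Int × Int))) : (List (List (Int × Int × Int))) × List Int :=
  let gray_rows := rgb_rows.map (fun row => row.map (fun p =>
      let s := PySem.Int.truncdiv (p.1 + p.2.1 + p.2.2) 3
      (s, s, s)))
  let flat := (gray_rows.map (fun row => row.map (fun p => p.1))).flatten
  let ghist := (PySem.List.pyRange 0 256 1).map (fun i => (PySem.List.count flat i : Int))
  (gray_rows, ghist)

-- ===== PRECONDITION & SPEC =====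
-- Pre_: exactly the inputs on which A returns normally — every pixel's truncated average lies in
-- [-256, 255] (i.e. r+g+b ∈ [-770, 767]); outside, 'ghist[s] += 1' raises IndexError.
def Pre_compute_grayscale_rows_and_hist (rgb_rows : List (List (Int × Int × Int))) : Prop :=
  ∀ row ∈ rgb_rows, ∀ p ∈ row, -770 ≤ p.1 + p.2.1 + p.2.2 ∧ p.1 + p.2.1 + p.2.2 ≤ 767
instance (rgb_rows : List (List (Int × Int × Int))) : Decidable (Pre_compute_grayscale_rows_and_hist rgb_rows) := by unfold Pre_compute_grayscale_rows_and_hist; infer_instance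
def pvWitness_compute_grayscale_rows_and_hist : (List (List (Int × Int × Int))) := [[(10, 20, 33)], [(255, 255, 255), (0, 0, 0)]]

-- On inputs containing a pixel whose truncated average gray level is negative (r+g+b ≤ -3), A
-- silently wraps the negative index and increments the TOP of the histogram (ghist[256+s]), while B
-- counts only gray levels 0..255 and leaves such values uncounted; B's histogram is the intended
-- one, since a negative gray level does not belong in bucket 256+s.
def D_compute_grayscale_rows_and_hist (rgb_rows : List (List (Int × Int × Int))) : Prop :=
  ∃ row ∈ rgb_rows, ∃ p ∈ row, p.1 + p.2.1 + p.2.2 ≤ -3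
instance (rgb_rows : List (List (Int × Int × Int))) : Decidable (D_compute_grayscale_rows_and_hist rgb_rows) := by unfold D_compute_grayscale_rows_and_hist; infer_instance

def Spec_compute_grayscale_rows_and_hist (rgb_rows : List (List (Int × Int × Int))) (out : (List (List (Int × Int × Int))) × List Int) : Prop := ¬ D_compute_grayscale_rows_and_hist rgb_rows → out = compute_grayscale_rows_and_hist_alt rgb_rows
instance (rgb_rows : List (List (Int × Int × Int))) (out : (List (List (Int × Int × Int))) × List Int) : Decidable (Spec_compute_grayscale_rows_and_hist rgb_rows out) := by unfold Spec_compute_grayscale_rows_and_hist; infer_instance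

def pvDiffWitness_compute_grayscale_rows_and_hist : (List (List (Int × Int × Int))) := [[(-3, 0, 0)]]
def pvDiffWitnessOut_compute_grayscale_rows_and_hist : ((List (List (Int × Int × Int))) × List Int) × ((List (List (Int × Int × Int))) × List Int) :=
  (([[((-1), (-1), (-1))]], [0, 0, 0, 0, 0, 0, 0, 0, 0, 0, 0, 0, 0, 0, 0, 0, 0, 0, 0, 0, 0, 0, 0, 0, 0, 0, 0, 0, 0, 0, 0, 0, 0, 0, 0, 0, 0, 0, 0, 0, 0, 0, 0, 0, 0, 0, 0, 0, 0, 0, 0, 0, 0, 0, 0, 0, 0, 0, 0, 0, 0, 0, 0, 0, 0, 0, 0, 0, 0, 0, 0, 0, 0, 0, 0, 0, 0, 0, 0, 0, 0, 0, 0, 0, 0, 0, 0, 0, 0, 0, 0, 0, 0, 0, 0, 0, 0, 0, 0, 0, 0, 0, 0, 0, 0, 0, 0, 0, 0, 0, 0, 0, 0, 0, 0, 0, 0, 0, 0, 0, 0, 0, 0, 0, 0, 0, 0, 0, 0, 0, 0, 0, 0, 0, 0, 0, 0, 0, 0, 0, 0, 0, 0, 0, 0, 0, 0, 0, 0, 0,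 0, 0, 0, 0, 0, 0, 0, 0, 0, 0, 0, 0, 0, 0, 0, 0, 0, 0, 0, 0, 0, 0, 0, 0, 0, 0, 0, 0, 0, 0, 0, 0, 0, 0, 0, 0, 0, 0, 0, 0, 0, 0, 0, 0, 0, 0, 0, 0, 0, 0, 0, 0, 0, 0, 0, 0, 0, 0, 0, 0, 0, 0, 0, 0, 0, 0, 0, 0, 0, 0, 0, 0, 0, 0, 0, 0, 0, 0, 0, 0, 0, 0, 0, 0, 0, 0, 0, 0, 0, 0, 0, 0, 0, 0, 0, 0, 0, 0, 0, 0, 0, 0, 0, 0, 0, 1]), ([[((-1), (-1), (-1))]], [0, 0, 0, 0, 0, 0, 0, 0, 0, 0, 0, 0, 0, 0, 0, 0, 0, 0, 0, 0, 0, 0, 0, 0, 0, 0, 0, 0, 0, 0, 0, 0, 0, 0, 0, 0, 0, 0, 0, 0, 0, 0, 0, 0, 0, 0, 0, 0, 0, 0, 0, 0, 0, 0, 0, 0, 0, 0, 0, 0, 0, 0, 0, 0, 0, 0, 0, 0, 0, 0, 0, 0, 0, 0, 0, 0, 0, 0, 0, 0, 0, 0, 0, 0, 0, 0, 0, 0,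 0, 0, 0, 0, 0, 0, 0, 0, 0, 0, 0, 0, 0, 0, 0, 0, 0, 0, 0, 0, 0, 0, 0, 0, 0, 0, 0, 0, 0, 0, 0, 0, 0, 0, 0, 0, 0, 0, 0, 0, 0, 0, 0, 0, 0, 0, 0, 0, 0, 0, 0, 0, 0, 0, 0, 0, 0, 0, 0, 0, 0, 0, 0, 0, 0, 0, 0, 0, 0, 0, 0, 0, 0, 0, 0, 0, 0, 0, 0, 0, 0, 0, 0, 0, 0, 0, 0, 0, 0, 0, 0, 0, 0, 0, 0, 0, 0, 0, 0, 0, 0, 0, 0, 0, 0, 0, 0, 0, 0, 0, 0, 0, 0, 0, 0, 0, 0, 0, 0, 0, 0, 0, 0, 0, 0, 0, 0, 0, 0, 0, 0, 0, 0, 0, 0, 0, 0, 0, 0, 0, 0, 0, 0, 0, 0, 0, 0, 0, 0, 0, 0, 0, 0, 0, 0, 0, 0, 0, 0, 0, 0, 0, 0, 0, 0, 0, 0, 0]))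

-- ===== CLAIM (what is proved, stated in full; the proofs are below) =====
def Claim_unchanged_compute_grayscale_rows_and_hist : Prop := ∀ (rgb_rows : List (List (Int × Int × Int))), Dom_compute_grayscale_rows_and_hist rgb_rows → Pre_compute_grayscale_rows_and_hist rgb_rows → Spec_compute_grayscale_rows_and_hist rgb_rows (compute_grayscale_rows_and_hist rgb_rows)
def Claim_changed_compute_grayscale_rows_and_hist : Prop := Dom_compute_grayscale_rows_and_hist (pvDiffWitness_compute_grayscale_rows_and_hist) ∧ Pre_compute_grayscale_rows_and_hist (pvDiffWitness_compute_grayscale_rows_and_hist) ∧ D_compute_grayscale_rows_and_hist (pvDiffWitness_compute_grayscale_rows_and_hist) ∧ compute_grayscale_rows_and_hist (pvDiffWitness_compute_grayscale_rows_and_hist) = pvDiffWitnessOut_compute_grayscale_rows_and_hist.1 ∧ compute_grayscale_rows_and_hist_alt (pvDiffWitness_compute_grayscale_rows_and_hist) = pvDiffWitnessOut_compute_grayscale_rows_and_hist.2 ∧ pvDiffWitnessOut_compute_grayscale_rows_and_hist.1 ≠ pvDiffWitnessOut_compute_grayscale_rows_and_hist.2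
def Claim_exact_compute_grayscale_rows_and_hist : Prop := ∀ (rgb_rows : List (List (Int × Int × Int))), Dom_compute_grayscale_rows_and_hist rgb_rows → Pre_compute_grayscale_rows_and_hist rgb_rows → D_compute_grayscale_rows_and_hist rgb_rows → compute_grayscale_rows_and_hist rgb_rows ≠ compute_grayscale_rows_and_hist_alt rgb_rows

-- ===== LEMMAS AND PROOFS =====

def pvS (p : Int × Int × Int) : Int := PySem.Int.truncdiv (p.1 + p.2.1 + p.2.2) 3
def pvGray (p : Int × Int × Int) : Int × Int × Int := (pvS p, pvS p, pvS p)
def pvBump (gh : List Int) (s : Int) : List Int := PySem.List.pySetD gh s (PySem.List.pyGetD gh s 0 + 1)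
def pvSvals (rgb_rows : List (List (Int × Int × Int))) : List Int := (rgb_rows.map (List.map pvS)).flatten

lemma foldlA_inner (row : List (Int × Int × Int)) (pr : List (Int × Int × Int)) (gh : List Int) :
  row.foldl (fun (pr : List (Int × Int × Int) × List Int) p =>
      let s := PySem.Int.truncdiv (p.1 + p.2.1 + p.2.2) 3
      (pr.1 ++ [(s, s, s)], PySem.List.pySetD pr.2 s (PySem.List.pyGetD pr.2 s 0 + 1))) (pr, gh)
  = (pr ++ row.map pvGray, (row.map pvS).foldl pvBump gh) := by
  induction row generalizing pr gh with
  | nil => simp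
  | cons p t ih => simp [ih, pvGray, pvS, pvBump]

lemma foldlA_outer_aux (rows : List (List (Int × Int × Int))) (gr : List (List (Int × Int × Int))) (gh : List Int) :
  rows.foldl (fun st row => (st.1 ++ [row.map pvGray], (row.map pvS).foldl pvBump st.2)) (gr, gh)
  = (gr ++ rows.map (List.map pvGray), (pvSvals rows).foldl pvBump gh) := by
  induction rows generalizing gr gh with
  | nil => simp [pvSvals]
  | cons row t ih => simp [ih, pvSvals]

lemma foldlA_outer (rows : List (List (Int × Int × Int))) (gr : List (List (Int × Int × Int))) (gh : List Int) :
  rows.foldl (fun st row =>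
      let inner := row.foldl (fun (pr : List (Int × Int × Int) × List Int) p =>
          let s := PySem.Int.truncdiv (p.1 + p.2.1 + p.2.2) 3
          (pr.1 ++ [(s, s, s)], PySem.List.pySetD pr.2 s (PySem.List.pyGetD pr.2 s 0 + 1)))
        (([] : List (Int × Int × Int)), st.2)
      (st.1 ++ [inner.1], inner.2)) (gr, gh)
  = (gr ++ rows.map (List.map pvGray), (pvSvals rows).foldl pvBump gh) := by
  rw [show (fun (st : List (List (Int × Int × Int)) × List Int) (row : List (Int × Int × Int)) =>
      let inner := row.foldl (fun (pr : List (Int × Int × Int) × List Int) p =>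
          let s := PySem.Int.truncdiv (p.1 + p.2.1 + p.2.2) 3
          (pr.1 ++ [(s, s, s)], PySem.List.pySetD pr.2 s (PySem.List.pyGetD pr.2 s 0 + 1)))
        (([] : List (Int × Int × Int)), st.2)
      (st.1 ++ [inner.1], inner.2))
    = (fun st row => (st.1 ++ [row.map pvGray], (row.map pvS).foldl pvBump st.2)) from by
      funext st row; simp [foldlA_inner]]
  exact foldlA_outer_aux rows gr gh

-- B's flat comprehension [p[0] for row in gray_rows for p in row] is exactly pvSvals
lemma flatB_eq (rows : List (List (Int × Int × Int))) :
    ((rows.map (fun row => row.map (fun p =>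
        let s := PySem.Int.truncdiv (p.1 + p.2.1 + p.2.2) 3
        (s, s, s)))).map (fun row => row.map (fun p => p.1))).flatten = pvSvals rows := by
  simp only [List.map_map, pvSvals]
  congr 1
  apply List.map_congr_left
  intro row _
  simp only [Function.comp_apply, List.map_map]
  apply List.map_congr_left
  intro p _
  rfl

lemma pyGetD_bump (gh : List Int) (hlen : gh.length = 256) (s i : Int)
    (hs : 0 ≤ s ∧ s < 256) (hi : 0 ≤ i ∧ i < 256) :
    PySem.List.pyGetD (pvBump gh s) i 0 = PySem.List.pyGetD gh i 0 + (if i = s then 1 else 0) := by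
  have h1 : pvBump gh s = PySem.List.pySetD gh ((s.toNat : Nat) : Int) (PySem.List.pyGetD gh s 0 + 1) := by
    simp [pvBump, hs.1]
  have h2 : i = ((i.toNat : Nat) : Int) := by omega
  rw [h1, h2, PySem.List.pyGetD_pySetD_natCast gh s.toNat i.toNat _ 0 (by omega)]
  by_cases h : i.toNat = s.toNat
  · have hs' : ((i.toNat : Nat) : Int) = s := by omega
    rw [hs']; simp [h]
  · simp [h]
    omega

lemma histA (l : List Int) : ∀ gh : List Int, gh.length = 256 → (∀ s ∈ l, 0 ≤ s ∧ s < 256) →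
    l.foldl pvBump gh = (PySem.List.pyRange 0 256 1).map (fun i => PySem.List.pyGetD gh i 0 + (l.count i : Int)) := by
  induction l with
  | nil =>
    intro gh hlen _
    have h := PySem.List.map_pyGetD_pyRange_zero' (xs := gh) (d := 0)
    rw [hlen] at h
    simpa using h.symm
  | cons s t ih =>
    intro gh hlen hall
    have hs := hall s (by simp)
    have hlen' : (pvBump gh s).length = 256 := by simp [pvBump, PySem.List.length_pySetD, hlen]
    rw [List.foldl_cons, ih (pvBump gh s) hlen' (fun x hx => hall x (by simp [hx]))]
    apply List.map_congr_left
    intro i hi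
    rw [PySem.List.mem_pyRange_one] at hi
    rw [pyGetD_bump gh hlen s i hs ⟨hi.1, hi.2⟩]
    by_cases h : i = s <;> simp [h, List.count_cons] <;> omega

lemma pvS_bounds_nonneg (p : Int × Int × Int) (h1 : -2 ≤ p.1 + p.2.1 + p.2.2) (h2 : p.1 + p.2.1 + p.2.2 ≤ 767) :
    0 ≤ pvS p ∧ pvS p < 256 := by
  set n := p.1 + p.2.1 + p.2.2 with hn
  have he : pvS p = n.tdiv 3 := rfl
  rcases (by omega : n = -2 ∨ n = -1 ∨ 0 ≤ n) with h | h | h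
  · rw [he, h]; decide
  · rw [he, h]; decide
  · rw [he, Int.tdiv_eq_ediv_of_nonneg h]; omega

set_option maxRecDepth 8192 in
theorem unchanged (rows : List (List (Int × Int × Int)))
    (hpre : ∀ row ∈ rows, ∀ p ∈ row, -770 ≤ p.1 + p.2.1 + p.2.2 ∧ p.1 + p.2.1 + p.2.2 ≤ 767)
    (hnd : ¬ ∃ row ∈ rows, ∃ p ∈ row, p.1 + p.2.1 + p.2.2 ≤ -3) :
    compute_grayscale_rows_and_hist rows = compute_grayscale_rows_and_hist_alt rows := by
  push_neg at hnd
  have hall : ∀ s ∈ pvSvals rows, 0 ≤ s ∧ s < 256 := by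
    intro s hs
    simp only [pvSvals, List.mem_flatten, List.mem_map] at hs
    obtain ⟨l, ⟨row, hrow, rfl⟩, hsl⟩ := hs
    obtain ⟨p, hp, rfl⟩ := List.mem_map.mp hsl
    exact pvS_bounds_nonneg p (by have := hnd row hrow p hp; omega) (hpre row hrow p hp).2
  show (_, _) = (_, _)
  rw [foldlA_outer]
  refine Prod.ext ?_ ?_ <;> dsimp only
  · rw [List.nil_append]; rfl
  · rw [flatB_eq]
    show (pvSvals rows).foldl pvBump (List.replicate 256 0) = _
    rw [histA (pvSvals rows) (List.replicate 256 0) (by simp) hall]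
    apply List.map_congr_left
    intro i hi
    rw [PySem.List.mem_pyRange_one] at hi
    rw [PySem.List.count_eq]
    have h0 : PySem.List.pyGetD (List.replicate 256 (0 : Int)) i 0 = 0 := by
      rw [PySem.List.pyGetD_eq_getElem (xs := List.replicate 256 (0 : Int)) (d := 0) hi.1
        (by rw [List.length_replicate]; omega)]
      exact List.getElem_replicate _
    rw [h0, zero_add]

lemma pySetD_neg_natCast (l : List Int) (v : Int) (k : Nat) (h1 : 0 < k) (h2 : k ≤ l.length) :
    PySem.List.pySetD l (-(k : Int)) v = l.set (l.length - k) v := by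
  simp [PySem.List.pySetD, PySem.List.pySet?, PySem.List.pyIdx?]
  rw [if_neg (by omega), if_pos h2]
  simp

lemma pv_sum_set (l : List Int) : ∀ (n : Nat) (v : Int), n < l.length →
    (l.set n v).sum = l.sum - l.getD n 0 + v := by
  induction l with
  | nil => intro n v h; simp at h
  | cons x t ih =>
    intro n v h
    cases n with
    | zero => simp; ring
    | succ m =>
      simp only [List.set_cons_succ, List.sum_cons, List.getD_cons_succ]
      rw [ih m v (by simpa using h)]
      ring

lemma pvS_range (p : Int × Int × Int) (h1 : -770 ≤ p.1 + p.2.1 + p.2.2) (h2 : p.1 + p.2.1 + p.2.2 ≤ 767) :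
    -256 ≤ pvS p ∧ pvS p < 256 := by
  set n := p.1 + p.2.1 + p.2.2 with hn
  have he : pvS p = n.tdiv 3 := rfl
  by_cases h : 0 ≤ n
  · rw [he, Int.tdiv_eq_ediv_of_nonneg h]; omega
  · have he' : pvS p = -((-n).tdiv 3) := by rw [he, ← Int.neg_tdiv, neg_neg]
    rw [he', Int.tdiv_eq_ediv_of_nonneg (by omega)]; omega

lemma pvS_neg (p : Int × Int × Int) (h1 : -770 ≤ p.1 + p.2.1 + p.2.2) (h2 : p.1 + p.2.1 + p.2.2 ≤ -3) :
    pvS p ≤ -1 := by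
  have he' : pvS p = -((-(p.1 + p.2.1 + p.2.2)).tdiv 3) := by
    show (p.1 + p.2.1 + p.2.2).tdiv 3 = _
    rw [← Int.neg_tdiv, neg_neg]
  rw [he', Int.tdiv_eq_ediv_of_nonneg (by omega)]; omega

lemma bump_resolve (gh : List Int) (s : Int) (hlen : gh.length = 256) (hs : -256 ≤ s ∧ s < 256) :
    ∃ n : Nat, n < gh.length ∧ pvBump gh s = gh.set n (gh.getD n 0 + 1) := by
  by_cases h : 0 ≤ s
  · refine ⟨s.toNat, by omega, ?_⟩
    rw [pvBump, PySem.List.pySetD_of_nonneg gh _ h,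
      PySem.List.pyGetD_eq_getElem gh 0 h (by omega)]
    rw [List.getD_eq_getElem _ _ (by omega)]
  · obtain ⟨k, hk1, hk2, rfl⟩ : ∃ k : Nat, 0 < k ∧ k ≤ 256 ∧ s = -((k : Nat) : Int) :=
      ⟨(-s).toNat, by omega, by omega, by omega⟩
    refine ⟨gh.length - k, by omega, ?_⟩
    rw [pvBump, pySetD_neg_natCast gh _ k hk1 (by omega),
      PySem.List.pyGetD_neg_natCast gh k 0 hk1 (by omega)]
    rw [List.getD_eq_getElem _ _ (by omega)]

lemma bump_fold_sum (l : List Int) : ∀ gh : List Int, gh.length = 256 →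
    (∀ s ∈ l, -256 ≤ s ∧ s < 256) →
    (l.foldl pvBump gh).sum = gh.sum + l.length ∧ (l.foldl pvBump gh).length = 256 := by
  induction l with
  | nil => intro gh hlen _; simp [hlen]
  | cons s t ih =>
    intro gh hlen hall
    obtain ⟨n, hn, hb⟩ := bump_resolve gh s hlen (hall s (by simp))
    have hlen' : (pvBump gh s).length = 256 := by rw [hb]; simp [hlen]
    obtain ⟨ihs, ihl⟩ := ih (pvBump gh s) hlen' (fun x hx => hall x (by simp [hx]))
    refine ⟨?_, by simpa using ihl⟩
    rw [List.foldl_cons, ihs, hb, pv_sum_set gh n _ hn]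
    simp only [List.length_cons]
    push_cast
    ring

lemma ghist_sum (l : List Int) :
    ((PySem.List.pyRange 0 256 1).map (fun i => (l.count i : Int))).sum
    = (l.countP (fun s => decide (0 ≤ s ∧ s < 256)) : Int) := by
  induction l with
  | nil =>
    rw [show (fun i : Int => ((List.count i ([] : List Int)) : Int)) = fun _ => (0 : Int) from
      funext (fun i => by rw [List.count_nil]; rfl)]
    simp only [List.map_const', List.sum_replicate, List.countP_nil, smul_zero, Int.natCast_zero]
  | cons s t ih =>
    have hf : (fun i : Int => ((s :: t).count i : Int))
        = fun i => (t.count i : Int) + (if i == s then 1 else 0) := by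
      funext i
      rw [List.count_cons]
      by_cases h : i = s
      · subst h; simp
      · simp [h, Ne.symm h]
    rw [hf, PySem.List.sum_map_add_int, ih, PySem.List.sum_map_ite_one_zero]
    have hcnt : (PySem.List.pyRange 0 256 1).countP (fun i => i == s)
        = (PySem.List.pyRange 0 256 1).count s := by
      simp [List.count]
    rw [hcnt, List.countP_cons]
    by_cases h : 0 ≤ s ∧ s < 256
    · rw [List.count_eq_one_of_mem (PySem.List.nodup_pyRange_one 0 256)
        (PySem.List.mem_pyRange_one.mpr ⟨h.1, h.2⟩)]
      have : (decide (0 ≤ s ∧ s < 256)) = true := by simp [h.1, h.2]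
      rw [this]
      simp
    · rw [List.count_eq_zero_of_not_mem (fun hmem => h ⟨(PySem.List.mem_pyRange_one.mp hmem).1,
        (PySem.List.mem_pyRange_one.mp hmem).2⟩)]
      have : (decide (0 ≤ s ∧ s < 256)) = false := by simpa using h
      rw [this]
      simp

theorem tight (rows : List (List (Int × Int × Int)))
    (hpre : ∀ row ∈ rows, ∀ p ∈ row, -770 ≤ p.1 + p.2.1 + p.2.2 ∧ p.1 + p.2.1 + p.2.2 ≤ 767)
    (hD : ∃ row ∈ rows, ∃ p ∈ row, p.1 + p.2.1 + p.2.2 ≤ -3) :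
    compute_grayscale_rows_and_hist rows ≠ compute_grayscale_rows_and_hist_alt rows := by
  intro heq
  have eA : compute_grayscale_rows_and_hist rows
      = ([] ++ rows.map (List.map pvGray), (pvSvals rows).foldl pvBump (List.replicate 256 0)) := by
    show (_, _) = _
    rw [foldlA_outer]
  have eB : compute_grayscale_rows_and_hist_alt rows
      = (rows.map (fun row => row.map (fun p =>
          let s := PySem.Int.truncdiv (p.1 + p.2.1 + p.2.2) 3
          (s, s, s))),
        (PySem.List.pyRange 0 256 1).map (fun i => ((pvSvals rows).count i : Int))) := by
    show (_, _) = _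
    refine Prod.ext rfl ?_
    dsimp only
    rw [flatB_eq]
    exact List.map_congr_left (fun i _ => by rw [PySem.List.count_eq])
  rw [eA, eB] at heq
  have h2 : (pvSvals rows).foldl pvBump (List.replicate 256 0)
      = (PySem.List.pyRange 0 256 1).map (fun i => ((pvSvals rows).count i : Int)) := by
    exact congrArg Prod.snd heq
  have hl : ∀ s ∈ pvSvals rows, -256 ≤ s ∧ s < 256 := by
    intro s hs
    simp only [pvSvals, List.mem_flatten, List.mem_map] at hs
    obtain ⟨l, ⟨row, hrow, rfl⟩, hsl⟩ := hs
    obtain ⟨p, hp, rfl⟩ := List.mem_map.mp hsl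
    exact pvS_range p (hpre row hrow p hp).1 (hpre row hrow p hp).2
  have hsumA := (bump_fold_sum (pvSvals rows) (List.replicate 256 0)
    (by rw [List.length_replicate]) hl).1
  have hrep : (List.replicate 256 (0 : Int)).sum = 0 := by rw [List.sum_replicate, smul_zero]
  have hsumB := ghist_sum (pvSvals rows)
  obtain ⟨row, hrow, p, hp, hps⟩ := hD
  have hs0 : pvS p ∈ pvSvals rows := by
    simp only [pvSvals, List.mem_flatten, List.mem_map]
    exact ⟨row.map pvS, ⟨row, hrow, rfl⟩, List.mem_map_of_mem hp⟩
  have hneg : pvS p ≤ -1 := pvS_neg p (hpre row hrow p hp).1 hps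
  have hlt : (pvSvals rows).countP (fun s => decide (0 ≤ s ∧ s < 256)) < (pvSvals rows).length := by
    refine Nat.lt_of_le_of_ne List.countP_le_length ?_
    intro hEq
    have := List.countP_eq_length.mp hEq (pvS p) hs0
    simp at this
    omega
  rw [h2, hsumB] at hsumA
  rw [hrep] at hsumA
  omega

-- ===== VERDICT (by name: the statement is the Claim_ definition above) =====
theorem compute_grayscale_rows_and_hist_spec : Claim_unchanged_compute_grayscale_rows_and_hist := by
  intro rows _ hpre hnd
  exact unchanged rows hpre hnd

set_option maxRecDepth 8192 in
theorem compute_grayscale_rows_and_hist_changed : Claim_changed_compute_grayscale_rows_and_hist := by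
  unfold Claim_changed_compute_grayscale_rows_and_hist
  exact ⟨by decide, by decide, by decide, by decide, by decide, by decide⟩

theorem compute_grayscale_rows_and_hist_tight : Claim_exact_compute_grayscale_rows_and_hist := by
  intro rows _ hpre hD
  exact tight rows hpre hD
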